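-- pv_equiv track=rewrite | github.com/plever-proof/intro-to-programming | main/Test.py | space_func
-- ===== SOURCE A (Python) =====
-- def space_func(data:list) -> str:
--
--     counter = 0
--     output_str = ""
--
--     for current_num in data:
--
--         if current_num > counter:
--             difference = current_num - counter
--
--             for i in range(0, difference):
--                 output_str += '_'
--             counter += difference
--         output_str += str(current_num)
--
--
--     return output_str
-- ===== SOURCE B (Python) =====
-- def space_func(data: list) -> str:
--     # Pass 1: running-maximum table (counter value before/after each element).
--     maxes = [0]
--     for num in data:
--         maxes.append(max(maxes[-1], num))
--     # Pass 2: each element contributes its gap of underscores plus its digits.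
--     return ''.join('_' * (cur - prev) + str(num)
--                    for prev, cur, num in zip(maxes, maxes[1:], data))
-- ===== Notes on version B (the rewrite author's own statement) =====
-- stated objective: alternative
-- what changed: A interleaves the running-max update with character-by-character underscore emission in one stateful loop; B first builds the prefix-maximum table in its own pass and then assembles the string in a second pass over zip(maxes, maxes[1:], data), joining per-element pieces '_'*(cur-prev)+str(num).
import Mathlib
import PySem

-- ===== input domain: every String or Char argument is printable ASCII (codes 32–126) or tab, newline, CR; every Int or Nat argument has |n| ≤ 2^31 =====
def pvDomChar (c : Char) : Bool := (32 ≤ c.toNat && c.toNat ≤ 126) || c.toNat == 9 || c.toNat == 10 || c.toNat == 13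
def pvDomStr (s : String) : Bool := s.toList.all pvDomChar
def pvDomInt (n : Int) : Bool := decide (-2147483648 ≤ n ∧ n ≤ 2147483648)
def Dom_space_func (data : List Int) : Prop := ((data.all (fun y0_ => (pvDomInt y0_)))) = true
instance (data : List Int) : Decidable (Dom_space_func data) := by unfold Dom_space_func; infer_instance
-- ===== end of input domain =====

-- B re-decomposes A's single interleaved running-max/emission loop into two passes:
-- a prefix-maximum table, then per-element pieces joined into the string (same cost, alternative shape).
-- Strings are carried as List Char (the PySem.Chars side) and packed with String.ofList at the end.

-- ===== PORT A =====
-- one stateful loop over data with state (counter, output_str); the inner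
-- 'for i in range(0, difference): output_str += "_"' is the pyRange foldl.
def space_func (data : List Int) : String :=
  let st := data.foldl (fun (st : Int × List Char) current_num =>
    let counter := st.1
    let output_str := st.2
    if current_num > counter then
      let difference := current_num - counter
      let output_str :=
        (PySem.List.pyRange 0 difference 1).foldl (fun s _ => s ++ ['_']) output_str
      let counter := counter + difference
      (counter, output_str ++ PySem.Int.toChars current_num)
    else
      (counter, output_str ++ PySem.Int.toChars current_num)) (0, ([] : List Char))
  String.ofList st.2

-- ===== PORT B =====
-- pass 1: maxes = [0]; for num in data: maxes.append(max(maxes[-1], num))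
-- (maxes[-1] via pyGet? at -1; the list is never empty, so the getD default is never consulted)
-- pass 2: ''.join('_' * (cur - prev) + str(num) for prev, cur, num in zip(maxes, maxes[1:], data))
def space_func_alt (data : List Int) : String :=
  let maxes := data.foldl
    (fun (maxes : List Int) num =>
      maxes ++ [max ((PySem.List.pyGet? maxes (-1)).getD 0) num]) [0]
  String.ofList (PySem.Chars.join []
    ((maxes.zip ((maxes.drop 1).zip data)).map
      (fun p => List.replicate (p.2.1 - p.1).toNat '_' ++ PySem.Int.toChars p.2.2)))

-- ===== PRECONDITION & SPEC =====
def Spec_space_func (data : List Int) (out : String) : Prop := out = space_func_alt data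
instance (data : List Int) (out : String) : Decidable (Spec_space_func data out) := by unfold Spec_space_func; infer_instance

-- ===== CLAIM (what is proved, stated in full; the proofs are below) =====
def Claim_equal_space_func : Prop := ∀ (data : List Int), Dom_space_func data → Spec_space_func data (space_func data)

-- ===== LEMMAS AND PROOFS =====

-- the loop bodies of the two ports, named so the induction hypotheses match syntactically
def pvAStep (st : Int × List Char) (current_num : Int) : Int × List Char :=
  let counter := st.1
  let output_str := st.2
  if current_num > counter then
    let difference := current_num - counter
    let output_str :=
      (PySem.List.pyRange 0 difference 1).foldl (fun s _ => s ++ ['_']) output_str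
    let counter := counter + difference
    (counter, output_str ++ PySem.Int.toChars current_num)
  else
    (counter, output_str ++ PySem.Int.toChars current_num)

def pvBStep (maxes : List Int) (num : Int) : List Int :=
  maxes ++ [max ((PySem.List.pyGet? maxes (-1)).getD 0) num]

-- the prefix-maximum table that B's first pass builds
def pvScanMax (c : Int) : List Int → List Int
  | [] => [c]
  | n :: r => c :: pvScanMax (max c n) r

-- the concatenation of B's per-element pieces, as one recursion
def pvPieces (c : Int) : List Int → List Char
  | [] => []
  | n :: r => List.replicate (max c n - c).toNat '_' ++ (PySem.Int.toChars n ++ pvPieces (max c n) r)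

theorem pvJoin_nil (l : List (List Char)) : PySem.Chars.join [] l = l.flatten := by
  induction l with
  | nil => simp [PySem.Chars.join, List.intercalate]
  | cons a t ih => cases t <;> simp_all [PySem.Chars.join, List.intercalate]

theorem pvUnderscores (l : List Int) : ∀ (s : List Char),
    l.foldl (fun s _ => s ++ ['_']) s = s ++ List.replicate l.length '_' := by
  induction l with
  | nil => intro s; simp
  | cons a r ih =>
    intro s
    simp only [List.foldl_cons, ih, List.length_cons]
    simp [List.replicate_succ]

theorem pvAStep_pos (c n : Int) (s : List Char) (h : n > c) :
    pvAStep (c, s) n = (n, s ++ (List.replicate (n - c).toNat '_' ++ PySem.Int.toChars n)) := by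
  simp only [pvAStep]
  rw [if_pos h, pvUnderscores, PySem.List.length_pyRange_one]
  have h1 : c + (n - c) = n := by omega
  rw [h1]
  simp

theorem pvAStep_neg (c n : Int) (s : List Char) (h : ¬ n > c) :
    pvAStep (c, s) n = (c, s ++ PySem.Int.toChars n) := by
  simp only [pvAStep]
  rw [if_neg h]

theorem pvA_fold (data : List Int) : ∀ (c : Int) (s : List Char),
    (data.foldl pvAStep (c, s)).2 = s ++ pvPieces c data := by
  induction data with
  | nil => intro c s; simp [pvPieces]
  | cons n r ih =>
    intro c s
    rw [List.foldl_cons]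
    by_cases h : n > c
    · rw [pvAStep_pos c n s h, ih]
      have hm : max c n = n := by omega
      simp [pvPieces, hm]
    · rw [pvAStep_neg c n s h, ih]
      have hm : max c n = c := by omega
      simp [pvPieces, hm]

theorem pvLast_pyGet (pre : List Int) (c : Int) :
    (PySem.List.pyGet? (pre ++ [c]) (-1)).getD 0 = c := by
  simp [PySem.List.pyGet?, PySem.List.pyIdx?]

theorem pvB_fold (data : List Int) : ∀ (pre : List Int) (c : Int),
    data.foldl pvBStep (pre ++ [c]) = pre ++ pvScanMax c data := by
  induction data with
  | nil => intro pre c; simp [pvScanMax]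
  | cons n r ih =>
    intro pre c
    rw [List.foldl_cons,
      show pvBStep (pre ++ [c]) n = (pre ++ [c]) ++ [max c n] from by
        rw [pvBStep, pvLast_pyGet],
      ih (pre ++ [c]) (max c n)]
    simp [pvScanMax]

theorem pvScanMax_head (c : Int) (l : List Int) : ∃ t, pvScanMax c l = c :: t := by
  cases l <;> exact ⟨_, rfl⟩

theorem pvB_join (data : List Int) : ∀ (c : Int),
    (((pvScanMax c data).zip (((pvScanMax c data).drop 1).zip data)).map
      (fun p => List.replicate (p.2.1 - p.1).toNat '_' ++ PySem.Int.toChars p.2.2)).flatten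
    = pvPieces c data := by
  induction data with
  | nil => intro c; simp [pvScanMax, pvPieces]
  | cons n r ih =>
    intro c
    obtain ⟨t, ht⟩ := pvScanMax_head (max c n) r
    have ih' := ih (max c n)
    rw [ht] at ih'
    simp only [List.drop_succ_cons, List.drop_zero] at ih'
    simp only [pvScanMax]
    rw [ht]
    simp only [List.drop_succ_cons, List.drop_zero, List.zip_cons_cons, List.map_cons,
      List.flatten_cons, ih']
    simp [pvPieces]

theorem pvA_eq (data : List Int) :
    space_func data = String.ofList ((data.foldl pvAStep (0, ([] : List Char))).2) := rfl

theorem pvB_eq (data : List Int) :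
    space_func_alt data = String.ofList (PySem.Chars.join []
      (((data.foldl pvBStep [0]).zip (((data.foldl pvBStep [0]).drop 1).zip data)).map
        (fun p => List.replicate (p.2.1 - p.1).toNat '_' ++ PySem.Int.toChars p.2.2))) := rfl

-- ===== VERDICT (by name: the statement is the Claim_ definition above) =====
theorem space_func_spec : Claim_equal_space_func := by
  intro data _
  show space_func data = space_func_alt data
  rw [pvA_eq, pvB_eq, pvA_fold data 0 [], List.nil_append,
    show data.foldl pvBStep [0] = pvScanMax 0 data from by
      have h := pvB_fold data [] 0; simpa using h,
    pvJoin_nil, pvB_join data 0]
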